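-- pv_equiv track=rewrite | github.com/northtatami/project_recheck | src/recheck/ui/diff_table_model.py | _compact_scope_folders
-- ===== SOURCE A (Python) =====
-- def _compact_scope_folders(folders: tuple[str, ...]) -> tuple[str, ...]:
--     normalized = sorted({item.strip().strip("/") for item in folders if item and item.strip()})
--     if not normalized:
--         return tuple()
--     kept: list[str] = []
--     for folder in sorted(normalized, key=len):
--         covered = False
--         for existing in kept:
--             if folder == existing or folder.startswith(f"{existing}/"):
--                 covered = True
--                 break
--         if not covered:
--             kept.append(folder)
--     return tuple(kept)
-- ===== SOURCE B (Python) =====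
-- def _compact_scope_folders(folders):
--     normalized = {item.strip().strip("/") for item in folders if item and item.strip()}
--     return tuple(
--         f for f in sorted(sorted(normalized), key=len)
--         if not any(f[:i] in normalized for i, c in enumerate(f) if c == "/")
--     )
-- ===== Notes on version B (the rewrite author's own statement) =====
-- stated objective: faster
-- what changed: B removes A's incremental kept-list and its inner linear scan entirely: it filters the length-sorted normalized list by testing each folder's proper '/'-prefixes for membership in the static normalized set (correct because a folder is redundant iff some proper slash-ancestor is in the normalized set, and the shortest such ancestor is always kept).
import Mathlib
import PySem

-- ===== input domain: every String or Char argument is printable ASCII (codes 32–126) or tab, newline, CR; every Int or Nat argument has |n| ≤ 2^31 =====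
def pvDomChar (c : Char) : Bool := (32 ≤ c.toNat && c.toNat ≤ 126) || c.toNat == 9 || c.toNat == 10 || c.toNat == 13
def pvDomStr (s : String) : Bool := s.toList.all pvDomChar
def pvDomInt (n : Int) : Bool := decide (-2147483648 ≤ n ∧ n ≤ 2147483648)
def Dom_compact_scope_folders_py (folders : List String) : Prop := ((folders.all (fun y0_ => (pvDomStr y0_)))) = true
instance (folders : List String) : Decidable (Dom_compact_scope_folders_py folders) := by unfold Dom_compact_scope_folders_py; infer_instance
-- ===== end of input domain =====

-- B drops A's incremental `kept` accumulator entirely: it filters the length-sorted list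
-- by testing each folder's proper '/'-prefixes against the STATIC normalized set (alternative algorithm, asymptotically fewer string comparisons).

-- ===== PORT A =====
-- inner loop of A: `for existing in kept: if folder == existing or folder.startswith(existing + "/"): covered = True; break`
def pvCoveredA (folder : String) (kept : List String) : Bool :=
  kept.any (fun existing => folder == existing || PySem.Str.startswith folder (existing ++ "/"))

def compact_scope_folders_py (folders : List String) : List String :=
  let normalized :=
    PySem.List.sorted
      (PySem.Set.ofList
        ((folders.filter (fun item => !(item == "") && !(PySem.Str.strip item == ""))).map
          (fun item => PySem.Str.stripChars (PySem.Str.strip item) "/")))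
      (fun s => s) false
  if normalized = [] then []
  else
    (PySem.List.sorted normalized (fun s => PySem.Str.len s) false).foldl
      (fun kept folder => if pvCoveredA folder kept then kept else kept ++ [folder]) []

-- ===== PORT B =====
-- `[f[:i] for i, c in enumerate(f) if c == "/"]` — the proper '/'-ancestor prefixes of f
def pvProperAncestors (f : String) : List String :=
  (PySem.List.enumerate f.toList).filterMap
    (fun p => if p.2 == '/' then some (String.ofList (PySem.List.slice f.toList none (some p.1))) else none)

def compact_scope_folders_py_alt (folders : List String) : List String :=
  let normalized :=
    PySem.Set.ofList
      ((folders.filter (fun item => !(item == "") && !(PySem.Str.strip item == ""))).map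
        (fun item => PySem.Str.stripChars (PySem.Str.strip item) "/"))
  (PySem.List.sorted (PySem.List.sorted normalized (fun s => s) false)
      (fun s => PySem.Str.len s) false).filter
    (fun f => !((pvProperAncestors f).any (fun p => PySem.Set.contains normalized p)))

-- ===== PRECONDITION & SPEC =====
def Spec_compact_scope_folders_py (folders : List String) (out : List String) : Prop := out = compact_scope_folders_py_alt folders
instance (folders : List String) (out : List String) : Decidable (Spec_compact_scope_folders_py folders out) := by unfold Spec_compact_scope_folders_py; infer_instance

-- ===== CLAIM (what is proved, stated in full; the proofs are below) =====
def Claim_equal_compact_scope_folders_py : Prop := ∀ (folders : List String), Dom_compact_scope_folders_py folders → Spec_compact_scope_folders_py folders (compact_scope_folders_py folders)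

-- ===== LEMMAS AND PROOFS =====

-- `e` is a proper '/'-ancestor of `f`
def pvSP (e f : String) : Prop := (e.toList ++ ['/']) <+: f.toList

theorem prefix_slash_iff (cs es : List Char) :
    (es ++ ['/']) <+: cs ↔ ∃ k, ∃ _ : k < cs.length, cs[k] = '/' ∧ es = cs.take k := by
  constructor
  · rintro ⟨t, ht⟩
    have hcs : cs = es ++ '/' :: t := by rw [← ht]; simp
    subst hcs
    refine ⟨es.length, by simp, ?_, ?_⟩
    · rw [List.getElem_append_right (Nat.le_refl _)]
      simp
    · simp
  · rintro ⟨k, hk, hsl, hes⟩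
    subst hes
    have : cs.take k ++ ['/'] = cs.take (k + 1) := by
      rw [List.take_add_one]
      simp [List.getElem?_eq_getElem hk, hsl]
    rw [this]
    exact List.take_prefix _ _

theorem mem_properAncestors_iff (f p : String) :
    p ∈ pvProperAncestors f ↔ pvSP p f := by
  simp only [pvProperAncestors, List.mem_filterMap, PySem.List.mem_enumerate_iff, pvSP]
  rw [prefix_slash_iff]
  constructor
  · rintro ⟨q, ⟨k, hk, rfl⟩, hp⟩
    simp only at hp
    split at hp
    · rename_i hsl
      refine ⟨k, hk, by simpa using hsl, ?_⟩
      have hsli : PySem.List.slice f.toList none (some ((0 : Int) + k)) = f.toList.take k := by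
        rw [show ((0 : Int) + k) = (k : Int) by omega, PySem.List.slice_to_natCast]
      rw [hsli] at hp
      have := congrArg String.toList (Option.some.inj hp)
      simpa using this.symm
    · exact absurd hp (by simp)
  · rintro ⟨k, hk, hsl, hes⟩
    refine ⟨((0 : Int) + k, f.toList[k]), ⟨k, hk, rfl⟩, ?_⟩
    simp [hsl, ← hes]

theorem startswith_iff_sp (f e : String) :
    PySem.Str.startswith f (e ++ "/") = true ↔ pvSP e f := by
  rw [PySem.Str.startswith_eq, PySem.Chars.startswith_iff, pvSP]
  have : (e ++ "/").toList = e.toList ++ ['/'] := by simp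
  rw [this]

theorem sp_len_lt {e f : String} (h : pvSP e f) : e.toList.length < f.toList.length := by
  have := h.length_le
  simpa using this

theorem sp_trans {a b c : String} (hab : pvSP a b) (hbc : pvSP b c) : pvSP a c := by
  unfold pvSP at *
  exact (hab.trans (List.prefix_append b.toList ['/'])).trans hbc

-- B's filter predicate, abstracted over the normalized set N
def pvBKeep (N : List String) (f : String) : Bool :=
  !((pvProperAncestors f).any (fun p => PySem.Set.contains N p))

theorem bkeep_iff (N : List String) (f : String) :
    pvBKeep N f = true ↔ ¬ ∃ p ∈ N, pvSP p f := by
  unfold pvBKeep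
  rw [Bool.not_eq_true', List.any_eq_false]
  constructor
  · rintro h ⟨p, hpN, hsp⟩
    exact h p ((mem_properAncestors_iff f p).2 hsp) ((PySem.Set.contains_iff N p).2 hpN)
  · intro h p hp hc
    exact h ⟨p, (PySem.Set.contains_iff N p).1 hc, (mem_properAncestors_iff f p).1 hp⟩

theorem bkeep_false (N : List String) (f : String) (h : ∃ p ∈ N, pvSP p f) :
    pvBKeep N f = false :=
  Bool.eq_false_iff.2 (fun hb => (bkeep_iff N f).1 hb h)

-- any p ∈ N that is an ancestor of f yields a KEPT ancestor of f (strong induction on |p|)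
theorem exists_kept_ancestor (N pre : List String) (f : String)
    (hNpre : ∀ q ∈ N, pvSP q f → q ∈ pre) :
    ∀ n (p : String), p.toList.length ≤ n → p ∈ N → pvSP p f →
      ∃ e ∈ pre.filter (pvBKeep N), pvSP e f := by
  intro n
  induction n with
  | zero =>
    intro p hlen hpN hsp
    by_cases hk : pvBKeep N p = true
    · exact ⟨p, List.mem_filter.2 ⟨hNpre p hpN hsp, hk⟩, hsp⟩
    · obtain ⟨q, hqN, hq⟩ : ∃ q ∈ N, pvSP q p := by
        by_contra hno
        exact hk ((bkeep_iff N p).2 hno)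
      have := sp_len_lt hq
      omega
  | succ n ih =>
    intro p hlen hpN hsp
    by_cases hk : pvBKeep N p = true
    · exact ⟨p, List.mem_filter.2 ⟨hNpre p hpN hsp, hk⟩, hsp⟩
    · have hex : ∃ q ∈ N, pvSP q p := by
        by_contra hno
        exact hk ((bkeep_iff N p).2 hno)
      obtain ⟨q, hqN, hq⟩ := hex
      have hql : q.toList.length ≤ n := by have := sp_len_lt hq; omega
      exact ih q hql hqN (sp_trans hq hsp)

theorem covered_iff (N pre : List String) (f : String)
    (hf : f ∉ pre)
    (hNpre : ∀ q ∈ N, pvSP q f → q ∈ pre) (hpreN : ∀ q ∈ pre, q ∈ N) :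
    pvCoveredA f (pre.filter (pvBKeep N)) = true ↔ ∃ p ∈ N, pvSP p f := by
  simp only [pvCoveredA, List.any_eq_true]
  constructor
  · rintro ⟨e, he, hcond⟩
    have hepre := (List.mem_filter.1 he).1
    rw [Bool.or_eq_true, beq_iff_eq] at hcond
    rcases hcond with rfl | h
    · exact absurd hepre hf
    · exact ⟨e, hpreN e hepre, (startswith_iff_sp f e).1 h⟩
  · rintro ⟨p, hpN, hsp⟩
    obtain ⟨e, he, hesp⟩ :=
      exists_kept_ancestor N pre f hNpre p.toList.length p (le_refl _) hpN hsp
    refine ⟨e, he, ?_⟩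
    rw [Bool.or_eq_true]
    exact Or.inr ((startswith_iff_sp f e).2 hesp)

theorem fold_eq_filter (N : List String) :
    ∀ (l pre : List String),
    (∀ q, q ∈ N ↔ q ∈ pre ++ l) → (pre ++ l).Nodup →
    (pre ++ l).Pairwise (fun a b => PySem.Str.len a ≤ PySem.Str.len b) →
    l.foldl (fun kept folder => if pvCoveredA folder kept then kept else kept ++ [folder])
        (pre.filter (pvBKeep N))
      = (pre ++ l).filter (pvBKeep N) := by
  intro l
  induction l with
  | nil => intro pre _ _ _; simp
  | cons f t ih =>
    intro pre hmem hnd hpw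
    have hf : f ∉ pre := fun h => (List.disjoint_of_nodup_append hnd) h (by simp)
    have hNpre : ∀ q ∈ N, pvSP q f → q ∈ pre := by
      intro q hqN hsp
      rcases List.mem_append.1 ((hmem q).1 hqN) with h | h
      · exact h
      · exfalso
        have hlt := sp_len_lt hsp
        rcases List.mem_cons.1 h with rfl | hqt
        · omega
        · have hle : PySem.Str.len f ≤ PySem.Str.len q := by
            have hp2 := (List.pairwise_append.1 hpw).2.1
            exact (List.pairwise_cons.1 hp2).1 q hqt
          simp only [PySem.Str.len] at hle
          omega
    have hpreN : ∀ q ∈ pre, q ∈ N := fun q hq => (hmem q).2 (by simp [hq])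
    have hcov := covered_iff N pre f hf hNpre hpreN
    have hstep :
        (if pvCoveredA f (pre.filter (pvBKeep N)) then pre.filter (pvBKeep N)
         else pre.filter (pvBKeep N) ++ [f]) = (pre ++ [f]).filter (pvBKeep N) := by
      rw [List.filter_append]
      by_cases hc : pvCoveredA f (pre.filter (pvBKeep N)) = true
      · have hbk : pvBKeep N f = false := bkeep_false N f (hcov.1 hc)
        simp [hc, hbk]
      · have hbk : pvBKeep N f = true := (bkeep_iff N f).2 (fun h => hc (hcov.2 h))
        simp [hc, hbk]
    have hre : pre ++ f :: t = (pre ++ [f]) ++ t := by simp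
    calc (f :: t).foldl
          (fun kept folder => if pvCoveredA folder kept then kept else kept ++ [folder])
          (pre.filter (pvBKeep N))
        = t.foldl (fun kept folder => if pvCoveredA folder kept then kept else kept ++ [folder])
            ((pre ++ [f]).filter (pvBKeep N)) := by
          simp only [List.foldl_cons]; rw [hstep]
      _ = ((pre ++ [f]) ++ t).filter (pvBKeep N) := by
          apply ih
          · intro q; rw [hmem q, ← hre]
          · rw [← hre]; exact hnd
          · rw [← hre]; exact hpw
      _ = (pre ++ f :: t).filter (pvBKeep N) := by rw [← hre]

theorem main_eq (N : List String) (hnd : N.Nodup) :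
    (if PySem.List.sorted N (fun s => s) false = [] then []
     else (PySem.List.sorted (PySem.List.sorted N (fun s => s) false)
            (fun s => PySem.Str.len s) false).foldl
       (fun kept folder => if pvCoveredA folder kept then kept else kept ++ [folder]) [])
    = (PySem.List.sorted (PySem.List.sorted N (fun s => s) false)
        (fun s => PySem.Str.len s) false).filter (pvBKeep N) := by
  by_cases hnil : PySem.List.sorted N (fun s => s) false = []
  · rw [if_pos hnil, hnil]
    rfl
  · rw [if_neg hnil]
    set L := PySem.List.sorted (PySem.List.sorted N (fun s => s) false)
      (fun s => PySem.Str.len s) false with hL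
    have hperm : L.Perm N :=
      (PySem.List.sorted_perm _ _ _).trans (PySem.List.sorted_perm _ _ _)
    have h := fold_eq_filter N L []
      (fun q => by rw [List.nil_append]; exact hperm.mem_iff.symm)
      (by rw [List.nil_append]; exact hperm.nodup_iff.2 hnd)
      (by rw [List.nil_append]
          exact PySem.List.sorted_pairwise (PySem.List.sorted N (fun s => s) false)
            (fun s => PySem.Str.len s))
    rw [List.nil_append, List.filter_nil] at h
    exact h

-- ===== VERDICT (by name: the statement is the Claim_ definition above) =====
theorem compact_scope_folders_py_spec : Claim_equal_compact_scope_folders_py := by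
  intro folders _
  unfold Spec_compact_scope_folders_py compact_scope_folders_py compact_scope_folders_py_alt
  exact main_eq _ (PySem.Set.nodup_ofList _)
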